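-- pv_equiv track=rewrite | github.com/yakshitgupta310/Data-Structures-and-Algorithm | String/WeightedUniformString.py | UniformString
-- ===== SOURCE A (Python) =====
-- def UniformString(s, queries):
--     weights = {}
--     result = []
--
--     for i in range(len(s)):
--         x = i
--         while s[i] == s[x]:
--             weight = ord(s[i]) - ord("a") + 1
--             weight = weight * (x - i + 1)
--             weights[weight] = 1
--             x += 1
--             if x >= len(s):
--                 break
--
--     for query in queries:
--         if query in weights:
--             result.append("Yes")
--         else:
--             result.append("No")
--
--     return result
-- ===== SOURCE B (Python) =====
-- def UniformString(s, queries):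
--     # One pass over maximal runs: a run of character c with length L contributes
--     # weights (ord(c)-96)*k for k = 1..L.
--     weights = set()
--     n = len(s)
--     i = 0
--     while i < n:
--         j = i
--         while j < n and s[j] == s[i]:
--             j += 1
--         w = ord(s[i]) - 96
--         weights.update(w * k for k in range(1, j - i + 1))
--         i = j
--     return ["Yes" if q in weights else "No" for q in queries]
-- ===== Notes on version B (the rewrite author's own statement) =====
-- stated objective: faster
-- what changed: A restarts an inner while-scan at every index (quadratic in run length) and collects weights in a dict; B scans each maximal run of equal characters once, adding weight*1..weight*L per run into a set, then answers the queries, making the weight-collection linear in the string length.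
import Mathlib
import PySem

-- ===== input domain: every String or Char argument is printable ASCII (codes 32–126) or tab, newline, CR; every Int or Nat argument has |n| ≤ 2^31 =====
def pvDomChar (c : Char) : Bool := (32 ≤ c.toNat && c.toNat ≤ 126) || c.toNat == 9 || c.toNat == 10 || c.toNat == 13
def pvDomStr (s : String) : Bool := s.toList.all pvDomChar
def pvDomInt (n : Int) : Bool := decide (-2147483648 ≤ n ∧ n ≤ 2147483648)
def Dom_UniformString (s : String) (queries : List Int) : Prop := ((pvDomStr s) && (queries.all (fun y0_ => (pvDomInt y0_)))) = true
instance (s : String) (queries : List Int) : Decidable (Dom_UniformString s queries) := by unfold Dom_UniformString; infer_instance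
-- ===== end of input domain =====

-- B replaces A's quadratic per-position inner while-loop by a single scan over maximal runs
-- (each run of char c and length L contributes weights (ord c - 96)*k, k = 1..L); objective: faster.

-- ===== PORT A =====
-- inner while-loop of A: extends x while s[i] == s[x], inserting each weight
def pvALoop (cs : List Char) (i x : Nat) (d : PySem.Dict Int Int) : PySem.Dict Int Int :=
  if _h : x < cs.length then
    if cs.getD i ' ' == cs.getD x ' ' then
      pvALoop cs i (x + 1)
        (d.insert ((((cs.getD i ' ').toNat : Int) - 97 + 1) * ((x : Int) - (i : Int) + 1)) 1)
    else d
  else d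
termination_by cs.length - x

def UniformString (s : String) (queries : List Int) : List String :=
  let cs := s.toList
  let weights := (List.range cs.length).foldl (fun d i => pvALoop cs i i d) PySem.Dict.empty
  queries.foldl (fun r q => r ++ [if weights.contains q then "Yes" else "No"]) []

-- ===== PORT B =====
-- maximal runs of the string, left to right, as (char, length)
def pvRuns (cs : List Char) : List (Char × Nat) :=
  match cs with
  | [] => []
  | c :: rest =>
      (c, (rest.takeWhile (· == c)).length + 1) :: pvRuns (rest.dropWhile (· == c))
termination_by cs.length
decreasing_by
  simp only [List.length_cons]
  exact Nat.lt_succ_of_le (List.length_dropWhile_le _ _)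

-- weights contributed by one run: w*1 .. w*L
def pvRunWeights (c : Char) (L : Nat) : List Int :=
  (List.range L).map (fun (k : Nat) => ((c.toNat : Int) - 96) * ((k : Int) + 1))

def UniformString_alt (s : String) (queries : List Int) : List String :=
  let weights := (pvRuns s.toList).foldl
      (fun st r => PySem.Set.update st (pvRunWeights r.1 r.2)) PySem.Set.empty
  queries.map (fun q => if PySem.Set.contains weights q then "Yes" else "No")

-- ===== PRECONDITION & SPEC =====
def Spec_UniformString (s : String) (queries : List Int) (out : List String) : Prop := out = UniformString_alt s queries
instance (s : String) (queries : List Int) (out : List String) : Decidable (Spec_UniformString s queries out) := by unfold Spec_UniformString; infer_instance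

-- ===== CLAIM (what is proved, stated in full; the proofs are below) =====
def Claim_equal_UniformString : Prop := ∀ (s : String) (queries : List Int), Dom_UniformString s queries → Spec_UniformString s queries (UniformString s queries)

-- ===== LEMMAS AND PROOFS =====

-- weight of a character (B's form)
def pvW (c : Char) : Int := (c.toNat : Int) - 96

-- length of the uniform prefix of l consisting of c
def pvE (c : Char) (l : List Char) : Nat := (l.takeWhile (· == c)).length

-- uniform-prefix helpers
theorem pvE_cons_pos (c b : Char) (l : List Char) (h : b = c) : pvE c (b :: l) = pvE c l + 1 := by
  simp [pvE, h]

theorem pvE_cons_neg (c b : Char) (l : List Char) (h : ¬ b = c) : pvE c (b :: l) = 0 := by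
  simp [pvE, h]

-- characterization of A's inner while-loop
theorem pvALoop_keys (cs : List Char) (i x : Nat) (d : PySem.Dict Int Int) (q : Int) :
    q ∈ (pvALoop cs i x d).keys ↔
      q ∈ d.keys ∨ ∃ t : Nat, t < pvE (cs.getD i ' ') (cs.drop x) ∧
        q = pvW (cs.getD i ' ') * ((x : Int) - (i : Int) + 1 + (t : Int)) := by
  fun_induction pvALoop cs i x d with
  | case1 x d h heq ih =>
    have hc : cs.getD x ' ' = cs.getD i ' ' := (beq_iff_eq.mp heq).symm
    have hdrop : cs.drop x = cs.getD x ' ' :: cs.drop (x + 1) := by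
      rw [List.getD_eq_getElem _ _ h]
      exact (List.getElem_cons_drop h).symm
    rw [ih, PySem.Dict.mem_keys_insert, hdrop, hc, pvE_cons_pos _ _ _ rfl]
    constructor
    · rintro ((rfl | hd) | ⟨t, ht, rfl⟩)
      · exact Or.inr ⟨0, by omega, by push_cast [pvW]; ring⟩
      · exact Or.inl hd
      · exact Or.inr ⟨t + 1, by omega, by push_cast; ring⟩
    · rintro (hd | ⟨t, ht, rfl⟩)
      · exact Or.inl (Or.inr hd)
      · cases t with
        | zero => exact Or.inl (Or.inl (by push_cast [pvW]; ring))
        | succ t => exact Or.inr ⟨t, by omega, by push_cast; ring⟩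
  | case2 x d h heq =>
    have hne : ¬ cs.getD x ' ' = cs.getD i ' ' := by
      intro he
      exact heq (by simpa [List.getD] using he.symm)
    have hdrop : cs.drop x = cs.getD x ' ' :: cs.drop (x + 1) := by
      rw [List.getD_eq_getElem _ _ h]
      exact (List.getElem_cons_drop h).symm
    rw [hdrop, pvE_cons_neg _ _ _ hne]
    simp
  | case3 x d h =>
    rw [List.drop_eq_nil_of_le (by omega)]
    simp [pvE]

-- characterization of A's whole dict
theorem pvA_fold_keys (cs : List Char) (q : Int) :
    (q ∈ ((List.range cs.length).foldl (fun d i => pvALoop cs i i d)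
        (PySem.Dict.empty : PySem.Dict Int Int)).keys) ↔
      ∃ i < cs.length, ∃ k : Nat, 1 ≤ k ∧ k ≤ pvE (cs.getD i ' ') (cs.drop i) ∧
        q = pvW (cs.getD i ' ') * (k : Int) := by
  have aux : ∀ m : Nat,
      (q ∈ ((List.range m).foldl (fun d i => pvALoop cs i i d)
          (PySem.Dict.empty : PySem.Dict Int Int)).keys) ↔
        ∃ i, i < m ∧ ∃ k : Nat, 1 ≤ k ∧ k ≤ pvE (cs.getD i ' ') (cs.drop i) ∧
          q = pvW (cs.getD i ' ') * (k : Int) := by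
    intro m
    induction m with
    | zero => simp [PySem.Dict.keys_empty]
    | succ m ih =>
      rw [List.range_succ, List.foldl_append, List.foldl_cons, List.foldl_nil, pvALoop_keys, ih]
      constructor
      · rintro (⟨i, hi, hk⟩ | ⟨t, ht, rfl⟩)
        · exact ⟨i, by omega, hk⟩
        · exact ⟨m, by omega, t + 1, by omega, by omega, by push_cast; ring⟩
      · rintro ⟨i, hi, k, h1, h2, rfl⟩
        by_cases him : i < m
        · exact Or.inl ⟨i, him, k, h1, h2, rfl⟩
        · have him' : i = m := by omega
          subst him'
          exact Or.inr ⟨k - 1, by omega, by congr 1; omega⟩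
  exact aux cs.length

theorem pvB_fold_mem (cs : List Char) (q : Int) :
    (q ∈ (pvRuns cs).foldl
        (fun st r => PySem.Set.update st (pvRunWeights r.1 r.2)) PySem.Set.empty) ↔
      ∃ r ∈ pvRuns cs, ∃ k : Nat, 1 ≤ k ∧ k ≤ r.2 ∧ q = pvW r.1 * (k : Int) := by
  have hmem : ∀ (c : Char) (L : Nat) (x : Int),
      x ∈ pvRunWeights c L ↔ ∃ k : Nat, 1 ≤ k ∧ k ≤ L ∧ x = pvW c * (k : Int) := by
    intro c L x
    rw [pvRunWeights, List.mem_map]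
    constructor
    · rintro ⟨k, hk, rfl⟩
      rw [List.mem_range] at hk
      exact ⟨k + 1, by omega, by omega, by rw [pvW]; push_cast; ring⟩
    · rintro ⟨k, h1, h2, rfl⟩
      refine ⟨k - 1, by rw [List.mem_range]; omega, ?_⟩
      rw [pvW]
      congr 1
      omega
  have aux : ∀ (rs : List (Char × Nat)) (st : PySem.Set Int),
      (q ∈ rs.foldl (fun st r => PySem.Set.update st (pvRunWeights r.1 r.2)) st) ↔
        q ∈ st ∨ ∃ r ∈ rs, ∃ k : Nat, 1 ≤ k ∧ k ≤ r.2 ∧ q = pvW r.1 * (k : Int) := by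
    intro rs
    induction rs with
    | nil => simp
    | cons r t ih =>
      intro st
      simp only [List.foldl_cons, ih, PySem.Set.mem_update, hmem, List.mem_cons]
      constructor
      · rintro ((hst | hw) | ⟨r', hr', rest⟩)
        · exact Or.inl hst
        · obtain ⟨k, h1, h2, rfl⟩ := hw
          exact Or.inr ⟨r, Or.inl rfl, k, h1, h2, rfl⟩
        · exact Or.inr ⟨r', Or.inr hr', rest⟩
      · rintro (hst | ⟨r', hr' | hr', k, hk1, hk2, rfl⟩)
        · exact Or.inl (Or.inl hst)
        · subst hr'
          exact Or.inl (Or.inr ⟨k, hk1, hk2, rfl⟩)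
        · exact Or.inr ⟨r', hr', k, hk1, hk2, rfl⟩
  simp [aux]

theorem pvE_rep (c : Char) (m : Nat) (R : List Char) (h0 : pvE c R = 0) :
    pvE c (List.replicate m c ++ R) = m := by
  induction m with
  | zero => simpa using h0
  | succ m ih =>
    rw [List.replicate_succ, List.cons_append, pvE_cons_pos _ _ _ rfl, ih]

theorem pvE_dropWhile (c : Char) (l : List Char) :
    pvE c (l.dropWhile (· == c)) = 0 := by
  induction l with
  | nil => simp [pvE]
  | cons b bs ih =>
    rw [List.dropWhile_cons]
    by_cases hb : b = c
    · rw [if_pos (by simp [hb])]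
      exact ih
    · rw [if_neg (by simp [hb])]
      exact pvE_cons_neg c b bs hb

theorem pvBridge (cs : List Char) (q : Int) :
    (∃ i < cs.length, ∃ k : Nat, 1 ≤ k ∧ k ≤ pvE (cs.getD i ' ') (cs.drop i) ∧
        q = pvW (cs.getD i ' ') * (k : Int)) ↔
      ∃ r ∈ pvRuns cs, ∃ k : Nat, 1 ≤ k ∧ k ≤ r.2 ∧ q = pvW r.1 * (k : Int) := by
  fun_induction pvRuns cs with
  | case1 => simp
  | case2 c rest ih =>
    have hT : c :: rest.takeWhile (· == c) =
        List.replicate ((rest.takeWhile (· == c)).length + 1) c := by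
      rw [List.eq_replicate_iff]
      refine ⟨by simp, ?_⟩
      intro b hb
      rcases List.mem_cons.mp hb with rfl | hb
      · rfl
      · have hb' := List.mem_takeWhile_imp hb
        exact beq_iff_eq.mp hb'
    have hsplit : c :: rest =
        List.replicate ((rest.takeWhile (· == c)).length + 1) c ++ rest.dropWhile (· == c) := by
      rw [← hT, List.cons_append, List.takeWhile_append_dropWhile]
    have hR0 : pvE c (rest.dropWhile (· == c)) = 0 := pvE_dropWhile c rest
    have hlen : (c :: rest).length
        = ((rest.takeWhile (· == c)).length + 1) + (rest.dropWhile (· == c)).length := by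
      conv_lhs => rw [hsplit]
      simp
    set L := (rest.takeWhile (· == c)).length + 1 with hLdef
    set R := rest.dropWhile (· == c) with hRdef
    have hgdL : ∀ i : Nat, i < L → (c :: rest).getD i ' ' = c := by
      intro i him
      conv_lhs => rw [hsplit]
      rw [List.getD_append _ _ _ _ (by simpa using him),
        List.getD_eq_getElem _ _ (by simpa using him)]
      exact List.getElem_replicate _
    have hdropL : ∀ i : Nat, i < L → (c :: rest).drop i = List.replicate (L - i) c ++ R := by
      intro i him
      conv_lhs => rw [hsplit]
      rw [List.drop_append_of_le_length (by simp; omega), List.drop_replicate]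
    have hgdR : ∀ i : Nat, L ≤ i → (c :: rest).getD i ' ' = R.getD (i - L) ' ' := by
      intro i him
      conv_lhs => rw [hsplit]
      rw [List.getD_append_right _ _ _ _ (by simp; omega)]
      simp
    have hdropR : ∀ i : Nat, L ≤ i → (c :: rest).drop i = R.drop (i - L) := by
      intro i him
      conv_lhs => rw [hsplit]
      rw [List.drop_append, List.drop_eq_nil_of_le (by simp; omega)]
      simp
    constructor
    · rintro ⟨i, hi, k, hk1, hk2, rfl⟩
      by_cases him : i < L
      · rw [hgdL i him, hdropL i him, pvE_rep _ _ _ hR0] at hk2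
        exact ⟨(c, L), List.mem_cons_self .., k, hk1, by omega, by rw [hgdL i him]⟩
      · rw [hgdR i (by omega), hdropR i (by omega)] at hk2
        obtain ⟨r, hr, hk⟩ := ih.mp ⟨i - L, by omega, k, hk1, hk2, by rw [hgdR i (by omega)]⟩
        exact ⟨r, List.mem_cons_of_mem _ hr, hk⟩
    · rintro ⟨r, hr, k, hk1, hk2, rfl⟩
      rcases List.mem_cons.mp hr with rfl | hr
      · refine ⟨0, by simp, k, hk1, ?_, by rw [hgdL 0 (by omega)]⟩
        rw [hgdL 0 (by omega), List.drop_zero, hsplit, pvE_rep _ _ _ hR0]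
        exact hk2
      · obtain ⟨i', hi', k', hk1', hk2', hq⟩ := ih.mpr ⟨r, hr, k, hk1, hk2, rfl⟩
        refine ⟨L + i', by omega, k', hk1', ?_, ?_⟩
        · rw [hgdR (L + i') (by omega), hdropR (L + i') (by omega),
            Nat.add_sub_cancel_left]
          exact hk2'
        · rw [hgdR (L + i') (by omega), Nat.add_sub_cancel_left]
          exact hq

theorem pv_foldl_app {α β : Type} (f : α → β) (l : List α) (acc : List β) :
    l.foldl (fun r q => r ++ [f q]) acc = acc ++ l.map f := by
  induction l generalizing acc with
  | nil => simp
  | cons a t ih => simp [ih]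

-- ===== VERDICT (by name: the statement is the Claim_ definition above) =====
theorem UniformString_spec : Claim_equal_UniformString := by
  intro s queries _
  unfold Spec_UniformString UniformString UniformString_alt
  simp only []
  rw [pv_foldl_app]
  simp only [List.nil_append]
  apply List.map_congr_left
  intro q _
  apply if_congr ?_ rfl rfl
  rw [PySem.Dict.contains_iff_mem_keys, PySem.Set.contains_iff, pvA_fold_keys, pvB_fold_mem]
  exact pvBridge s.toList q
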